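/- GENERATED by mk_final_copies.py from the proof of the farm's unit `vorbis_decode_packet_rest.13` (farm:vorbis_decode_packet_rest.13.3: Proof.lean) as the
   re-elaboration sweep compiled it — do not edit. -/
import Asan.CheckWalk
import Vorbis.Spec.Units.vorbis_decode_packet_rest_13
import Vorbis.Spec.Worked.vorbis_decode_packet_rest_13_Lemmas

open X86 X86.User Asan Vorbis Vorbis.Spec Vorbis.Spec.vorbis_decode_packet_rest

/-- Segment 13 of `vorbis_decode_packet_rest` (0x111939 … 0x1119bc, stb_vorbis_fixed.c:3411–3431): the call of flush_packet and the
discard bookkeeping (`*p_left = left_start` on the two discard arms), from `At13` to `At14`. The whole walk is `seg13_of_args_below` of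
Lemmas.lean (two walks, the call, 7 check sites, 4 exits); it needs that the `int` at `p_left` lies above the two stack-argument slots
`[entry rsp + 8, entry rsp + 24)`, so that the stores 0x111aec / 0x111b14 keep `Stable.arg_re` and `Stable.arg_left`. That fact is the
clause `Args.left_above` of the function's precondition, reached from the entry assertion through `Frame.pre`
(`pre = ShadowPre ∧ DecodeInv ∧ Args`). -/
theorem Vorbis.Spec.Worked.vorbis_decode_packet_rest_13_ok : Vorbis.Spec.vorbis_decode_packet_rest_13.Statement := by
  intro Lay hLay μ hμ u₀ hcode h_flush hload1 hstore4 hload4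
  intro others frames len Ar stored room mode ysz e ret v hat
  have hoff : (e.reg .rsp).toNat + 24 ≤ pLeftOf e := hat.pre.2.2.left_above
  exact Vorbis.Spec.vorbis_decode_packet_rest_13.seg13_of_args_below Lay hLay μ hμ u₀ hcode h_flush hload1 hstore4 hload4
    others frames len Ar stored room mode ysz e ret v hat hoff
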